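-- pv_equiv track=rewrite | github.com/JacquesLucke/code_autocomplete | text_operators.py | get_string_definition_type
-- ===== SOURCE A (Python) =====
-- def get_string_definition_type(text, current_index):
--     string_letter = None
--     for i in range(current_index):
--         letter = text[i]
--         if letter == '"':
--             if string_letter == '"':
--                 string_letter = None
--             elif string_letter is None:
--                 string_letter = letter
--         if letter == "'":
--             if string_letter == "'":
--                 string_letter = None
--             elif string_letter is None:
--                 string_letter = letter
--     return string_letter
-- ===== SOURCE B (Python) =====
-- def get_string_definition_type(text, current_index):
--     i = 0
--     while i < current_index:
--         c = text[i]
--         if c == '"' or c == "'":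
--             j = text.find(c, i + 1)
--             if j == -1 or j >= current_index:
--                 return c
--             i = j + 1
--         else:
--             i += 1
--     return None
-- ===== Notes on version B (the rewrite author's own statement) =====
-- stated objective: alternative
-- what changed: Replaced A's per-character quote-toggle state machine over every index in range(current_index) with a delimiter-seeking scan that jumps from each opening quote directly to its closing quote via str.find, skipping whole string bodies.
import Mathlib
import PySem

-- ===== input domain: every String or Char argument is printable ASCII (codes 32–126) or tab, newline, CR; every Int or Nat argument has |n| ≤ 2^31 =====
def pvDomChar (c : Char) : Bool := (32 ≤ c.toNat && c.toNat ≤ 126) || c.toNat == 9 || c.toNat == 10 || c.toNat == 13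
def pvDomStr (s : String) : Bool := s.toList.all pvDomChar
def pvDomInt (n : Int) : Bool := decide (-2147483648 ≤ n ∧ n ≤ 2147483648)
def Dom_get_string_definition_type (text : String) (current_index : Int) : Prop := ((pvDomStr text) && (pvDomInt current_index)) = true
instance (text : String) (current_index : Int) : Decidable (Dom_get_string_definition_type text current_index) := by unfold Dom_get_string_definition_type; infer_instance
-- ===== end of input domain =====

-- B replaces A's per-character quote-toggle state machine by a delimiter-seeking scan that
-- jumps from an opening quote straight to its closing quote via str.find (objective:
-- alternative algorithm; equivalence of return values proved below on current_index ≤ len(text)).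

-- ===== PORT A =====
-- A's per-letter state update (the body of A's for-loop): two sequential ifs on letter.
def pvStepA (st : Option Char) (letter : Char) : Option Char :=
  let st1 := if letter = '"' then
      (if st = some '"' then none else if st = none then some letter else st)
    else st
  if letter = '\'' then
      (if st1 = some '\'' then none else if st1 = none then some letter else st1)
    else st1

def get_string_definition_type (text : String) (current_index : Int) : Option String :=
  let sl := (PySem.List.pyRange 0 current_index 1).foldl
      (fun st i => pvStepA st (PySem.List.pyGetD text.toList i ' ')) none
  sl.map (fun c => String.ofList [c])

-- ===== PORT B =====
-- B's while-loop; fuel only makes the recursion total (i strictly increases each step,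
-- so current_index.toNat + 1 units never run out while the guard i < n holds).
def pvLoopB (L : List Char) (n : Int) : Int → Nat → Option Char
  | _, 0 => none
  | i, fuel + 1 =>
    if i < n then
      let c := PySem.List.pyGetD L i ' '
      if c = '"' ∨ c = '\'' then
        let j := PySem.Chars.findFrom L [c] (i + 1) none
        if j = -1 ∨ j ≥ n then some c
        else pvLoopB L n (j + 1) fuel
      else pvLoopB L n (i + 1) fuel
    else none

def get_string_definition_type_alt (text : String) (current_index : Int) : Option String :=
  (pvLoopB text.toList current_index 0 (current_index.toNat + 1)).map (fun c => String.ofList [c])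

-- ===== PRECONDITION & SPEC =====
-- Pre_ excludes exactly current_index > len(text), where A raises IndexError.
def Pre_get_string_definition_type (text : String) (current_index : Int) : Prop :=
  current_index ≤ (PySem.Str.len text : Int)
instance (text : String) (current_index : Int) : Decidable (Pre_get_string_definition_type text current_index) := by unfold Pre_get_string_definition_type; infer_instance
def pvWitness_get_string_definition_type : String × Int := ("a'b\"c", 4)

def Spec_get_string_definition_type (text : String) (current_index : Int) (out : Option String) : Prop := out = get_string_definition_type_alt text current_index
instance (text : String) (current_index : Int) (out : Option String) : Decidable (Spec_get_string_definition_type text current_index out) := by unfold Spec_get_string_definition_type; infer_instance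

-- ===== CLAIM (what is proved, stated in full; the proofs are below) =====
def Claim_equal_get_string_definition_type : Prop := ∀ (text : String) (current_index : Int), Dom_get_string_definition_type text current_index → Pre_get_string_definition_type text current_index → Spec_get_string_definition_type text current_index (get_string_definition_type text current_index)

-- ===== LEMMAS AND PROOFS =====


-- pvStepA from the empty state: a quote opens, anything else is ignored.
theorem pvStepA_none (c : Char) :
    pvStepA none c = if c = '"' ∨ c = '\'' then some c else none := by
  by_cases h1 : c = '"' <;> by_cases h2 : c = '\'' <;> simp_all [pvStepA]

-- pvStepA inside a string opened by quote q: only q itself closes it.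
theorem pvStepA_some (q c : Char) (hq : q = '"' ∨ q = '\'') :
    pvStepA (some q) c = if c = q then none else some q := by
  rcases hq with hq | hq <;> subst hq <;>
    by_cases h1 : c = '"' <;> by_cases h2 : c = '\'' <;> simp_all [pvStepA]

-- a segment without the opening quote leaves the state unchanged
theorem pvFoldl_stay (q : Char) (hq : q = '"' ∨ q = '\'') :
    ∀ (seg : List Char), q ∉ seg → seg.foldl pvStepA (some q) = some q := by
  intro seg
  induction seg with
  | nil => intro _; rfl
  | cons x xs ih =>
    intro h
    simp only [List.mem_cons, not_or] at h
    simp only [List.foldl_cons, pvStepA_some q x hq, if_neg (fun hxq => h.1 (Eq.symm hxq))]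
    exact ih h.2

-- no occurrence of c at any index in [a, b) means c is absent from that slice of L
theorem pvNoOcc (L : List Char) (c : Char) (a b : Nat) (hb : b ≤ L.length)
    (h : ∀ m, a ≤ m → m < b → ¬ [c] <+: L.drop m) :
    c ∉ (L.drop a).take (b - a) := by
  intro hmem
  obtain ⟨k, hk, hget⟩ := List.mem_iff_getElem.mp hmem
  have hkb : k < b - a ∧ k < L.length - a := by simpa using hk
  rw [List.getElem_take, List.getElem_drop] at hget
  refine h (a + k) (by omega) (by omega) ?_
  rw [List.drop_eq_getElem_cons (by omega : a + k < L.length), hget]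
  exact ⟨_, rfl⟩

-- B's loop computes A's fold over the still-unread part of the prefix text[:n]
theorem pvLoopB_eq (L : List Char) (n : Int) (hn : n ≤ (L.length : Int)) :
    ∀ (fuel : Nat) (i : Nat), n - (i : Int) ≤ (fuel : Int) →
      pvLoopB L n (i : Int) fuel = ((L.take n.toNat).drop i).foldl pvStepA none := by
  intro fuel
  induction fuel with
  | zero =>
    intro i hfu
    have hni : n ≤ (i : Int) := by omega
    have : (L.take n.toNat).drop i = [] := by
      apply List.drop_eq_nil_of_le
      simp only [List.length_take]
      omega
    simp [pvLoopB, this]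
  | succ fuel ih =>
    intro i hfu
    by_cases hlt : (i : Int) < n
    · have hiN : i < n.toNat := by omega
      have hiL : i < L.length := by omega
      have hgetc : PySem.List.pyGetD L (i : Int) ' ' = L[i] := by
        simp [PySem.List.pyGetD_natCast, List.getD_eq_getElem?_getD, hiL]
      have hdropS : (L.take n.toNat).drop i = L[i] :: (L.take n.toNat).drop (i + 1) := by
        have hi' : i < (L.take n.toNat).length := by simp; omega
        rw [List.drop_eq_getElem_cons hi', List.getElem_take]
      have hstart : ((i : Int) + 1) = ((i + 1 : Nat) : Int) := by push_cast; ring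
      by_cases hq : L[i] = '"' ∨ L[i] = '\''
      · -- a quote: B seeks the closing quote
        have hi1L : i + 1 ≤ L.length := by omega
        simp only [pvLoopB, if_pos hlt, hgetc, if_pos hq, hstart]
        obtain ⟨j, hj⟩ : ∃ j, PySem.Chars.findFrom L [L[i]'hiL] ((i + 1 : Nat) : Int) none = j :=
          ⟨_, rfl⟩
        rw [hj]
        by_cases hfound : j = -1
        · -- unmatched quote: inside until the end
          have hnin : ¬ [L[i]] <:+: L.drop (i + 1) :=
            (PySem.Chars.findFrom_natCast_eq_neg_one_iff L [L[i]'hiL] (i+1) hi1L).mp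
              (hj.trans hfound)
          have hninm : L[i] ∉ (L.take n.toNat).drop (i + 1) := by
            intro hmem
            apply hnin
            rw [List.singleton_infix_iff]
            rw [List.drop_take] at hmem
            exact List.mem_of_mem_take hmem
          have hres : ((L.take n.toNat).drop i).foldl pvStepA none = some L[i] := by
            rw [hdropS]
            simp only [List.foldl_cons, pvStepA_none, if_pos hq]
            exact pvFoldl_stay L[i] hq _ hninm
          rw [if_pos (Or.inl hfound), hres]
          rfl
        · -- quote found at j
          obtain ⟨hge, hpre, hmin⟩ := PySem.Chars.findFrom_natCast_spec L [L[i]'hiL] (i+1) hi1L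
            (fun hcon => hfound (hj.symm.trans hcon))
          rw [hj] at hge hpre hmin
          have hj0 : 0 ≤ j := le_trans (by positivity) hge
          have hjn : i + 1 ≤ j.toNat := by omega
          by_cases hbig : n ≤ j
          · -- closing quote at or beyond current_index: still inside
            have hninm : L[i] ∉ (L.take n.toNat).drop (i + 1) := by
              rw [List.drop_take]
              exact pvNoOcc L L[i] (i+1) n.toNat (by omega)
                (fun m hm1 hm2 => hmin m hm1 (by omega))
            have hres : ((L.take n.toNat).drop i).foldl pvStepA none = some L[i] := by
              rw [hdropS]
              simp only [List.foldl_cons, pvStepA_none, if_pos hq]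
              exact pvFoldl_stay L[i] hq _ hninm
            rw [if_pos (Or.inr hbig), hres]
            rfl
          · -- closing quote before current_index: skip the whole string body
            push Not at hbig
            have hjL : j.toNat < L.length := by omega
            have hjnN : j.toNat < n.toNat := by omega
            have hcj : L[j.toNat] = L[i] := by
              rw [List.drop_eq_getElem_cons hjL] at hpre
              simp only [List.cons_prefix_cons] at hpre
              exact hpre.1.symm
            have hs1 : L[i] ∉ (L.drop (i+1)).take (j.toNat - (i+1)) :=
              pvNoOcc L L[i] (i+1) j.toNat (by omega)
                (fun m hm1 hm2 => hmin m hm1 hm2)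
            have hseg : (L.take n.toNat).drop (i + 1) =
                ((L.drop (i+1)).take (j.toNat - (i+1))) ++
                  L[j.toNat] :: (L.take n.toNat).drop (j.toNat + 1) := by
              have h1 : (L.take n.toNat).drop (i+1) =
                  ((L.take n.toNat).take j.toNat).drop (i+1) ++ (L.take n.toNat).drop j.toNat := by
                conv_lhs => rw [← List.take_append_drop j.toNat (L.take n.toNat)]
                rw [List.drop_append_of_le_length]
                simp; omega
              have h2 : ((L.take n.toNat).take j.toNat).drop (i+1) =
                  (L.drop (i+1)).take (j.toNat - (i+1)) := by
                rw [List.take_take, min_eq_left (le_of_lt hjnN), List.drop_take]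
              have h3 : (L.take n.toNat).drop j.toNat =
                  L[j.toNat] :: (L.take n.toNat).drop (j.toNat + 1) := by
                have hj' : j.toNat < (L.take n.toNat).length := by simp; omega
                rw [List.drop_eq_getElem_cons hj', List.getElem_take]
              rw [h1, h2, h3]
            have hres : ((L.take n.toNat).drop i).foldl pvStepA none =
                ((L.take n.toNat).drop (j.toNat + 1)).foldl pvStepA none := by
              rw [hdropS, hseg]
              simp only [List.foldl_cons, pvStepA_none, if_pos hq, List.foldl_append]
              rw [pvFoldl_stay L[i] hq _ hs1]
              simp only [hcj, pvStepA_some L[i] L[i] hq]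
              simp
            have hjcast : j + 1 = ((j.toNat + 1 : Nat) : Int) := by push_cast; omega
            rw [if_neg (by push Not; exact ⟨hfound, hbig⟩), hjcast,
              ih (j.toNat + 1) (by push_cast; omega), hres]
      · -- not a quote: step over one character
        have hstep : ((L.take n.toNat).drop i).foldl pvStepA none =
            ((L.take n.toNat).drop (i + 1)).foldl pvStepA none := by
          rw [hdropS]; simp only [List.foldl_cons, pvStepA_none, if_neg hq]
        simp only [pvLoopB, if_pos hlt, hgetc, if_neg hq, hstart]
        rw [ih (i+1) (by push_cast; omega), hstep]
    · have hni : n ≤ (i : Int) := le_of_not_gt hlt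
      have : (L.take n.toNat).drop i = [] := by
        apply List.drop_eq_nil_of_le; simp only [List.length_take]; omega
      simp [pvLoopB, hlt, this]

-- A's fold over range(n) with indexing is the fold over the character prefix
theorem pvFoldA_eq (L : List Char) (n : Int) (hn : n ≤ (L.length : Int)) :
    (PySem.List.pyRange 0 n 1).foldl
      (fun st i => pvStepA st (PySem.List.pyGetD L i ' ')) none =
    (L.take n.toNat).foldl pvStepA none := by
  rw [PySem.List.pyRange_one, List.foldl_map]
  have hm : n.toNat ≤ L.length := by omega
  have key : ∀ (m : Nat), m ≤ L.length →
      (List.range m).foldl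
        (fun (st : Option Char) (k : Nat) => pvStepA st (PySem.List.pyGetD L (0 + (k:Int)) ' '))
        none =
      (L.take m).foldl pvStepA none := by
    intro m
    induction m with
    | zero => intro _; rfl
    | succ m ihm =>
      intro hmL
      have hmL' : m < L.length := by omega
      rw [List.range_succ, List.foldl_append, ihm (by omega),
        List.take_succ_eq_append_getElem hmL', List.foldl_append]
      simp only [List.foldl_cons, List.foldl_nil, zero_add]
      congr 1
      simp [PySem.List.pyGetD_natCast, List.getD_eq_getElem?_getD, hmL']
  simpa using key n.toNat hm

-- ===== VERDICT =====
theorem get_string_definition_type_spec : Claim_equal_get_string_definition_type := by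
  intro text n _ hpre
  unfold Spec_get_string_definition_type
  unfold get_string_definition_type get_string_definition_type_alt
  have hn : n ≤ (text.toList.length : Int) := by
    simpa [PySem.Str.len_eq] using hpre
  rw [pvFoldA_eq text.toList n hn,
    show (0 : Int) = ((0 : Nat) : Int) from rfl,
    pvLoopB_eq text.toList n hn (n.toNat + 1) 0 (by push_cast; omega)]
  simp
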